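-- pv_equiv track=rewrite | github.com/RealNattawattHongthong/Ai-Builder-answer-2023 | python/chapter5.py | appearxtimes
-- ===== SOURCE A (Python) =====
-- from collections import Counter
--
-- def appearxtimes(lst):
--     x = lst[0]
--     num_counts = Counter(lst[1:])
--     filtered_counts = {num: count for num, count in num_counts.items() if count == x}
--     if not filtered_counts:
--         return -1
--     else:
--         min_num = min(filtered_counts.keys())
--         return min_num
-- ===== SOURCE B (Python) =====
-- def appearxtimes(lst):
--     x = lst[0]
--     s = sorted(lst[1:])
--     if not s:
--         return -1
--     run_val, run_len = s[0], 1
--     for v in s[1:]: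
--         if v == run_val:
--             run_len += 1
--         else:
--             if run_len == x:
--                 return run_val
--             run_val, run_len = v, 1
--     return run_val if run_len == x else -1
-- ===== Notes on version B (the rewrite author's own statement) =====
-- stated objective: alternative
-- what changed: Replaces A's Counter + dict-comprehension + min() pipeline by sorting the tail and doing one run-length scan that returns at the first (hence smallest) value whose run length equals the target count taken from the list's first element.
import Mathlib
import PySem

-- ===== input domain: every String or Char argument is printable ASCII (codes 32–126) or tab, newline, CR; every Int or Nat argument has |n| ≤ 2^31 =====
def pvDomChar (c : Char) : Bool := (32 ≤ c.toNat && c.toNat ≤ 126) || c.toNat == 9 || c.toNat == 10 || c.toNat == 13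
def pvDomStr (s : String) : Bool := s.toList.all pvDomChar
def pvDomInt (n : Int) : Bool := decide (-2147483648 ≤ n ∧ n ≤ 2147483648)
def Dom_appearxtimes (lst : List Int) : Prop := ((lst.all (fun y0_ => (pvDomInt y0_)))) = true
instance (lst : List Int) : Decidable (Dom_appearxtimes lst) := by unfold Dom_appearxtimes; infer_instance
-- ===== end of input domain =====

-- B replaces A's Counter + dict-comprehension + min() pipeline by one run-length scan of the
-- sorted tail that can return at the first (hence smallest) value whose run length equals the target count x (the first element)
-- (objective: alternative decomposition, similar cost).

-- ===== PORT A =====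
def appearxtimes (lst : List Int) : Int :=
  let x := PySem.List.pyGetD lst 0 0                                 -- the first element; Pre_ guarantees a nonempty list
  let numCounts := PySem.Dict.counter (PySem.List.slice lst (some 1))  -- Counter(lst[1:])
  let filteredCounts := PySem.Dict.ofList (numCounts.items.filter (fun p => p.2 == x))
  if filteredCounts.items = [] then -1
  else
    match PySem.List.min? filteredCounts.keys (fun k => k) with      -- min(filtered_counts.keys())
    | some m => m
    | none => -1                                                     -- unreachable: keys nonempty here

-- ===== PORT B =====
-- the for-loop of Source B over s[1:], carrying (run_val, run_len)
def bRunLoop (x : Int) : List Int → Int → Int → Int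
  | [], runVal, runLen => if runLen = x then runVal else -1
  | v :: rest, runVal, runLen =>
      if v = runVal then bRunLoop x rest runVal (runLen + 1)
      else if runLen = x then runVal
      else bRunLoop x rest v 1

def appearxtimes_alt (lst : List Int) : Int :=
  let x := PySem.List.pyGetD lst 0 0
  let s := PySem.List.sorted (PySem.List.slice lst (some 1)) (fun y => y)
  match s with
  | [] => -1
  | h :: t => bRunLoop x t h 1

-- ===== PRECONDITION & SPEC =====
-- Pre_ excludes only the empty list, on which A raises IndexError reading its first element.
def Pre_appearxtimes (lst : List Int) : Prop := lst ≠ []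
instance (lst : List Int) : Decidable (Pre_appearxtimes lst) := by unfold Pre_appearxtimes; infer_instance
def pvWitness_appearxtimes : List Int := [2, 5, 3, 5, 3, 3]

def Spec_appearxtimes (lst : List Int) (out : Int) : Prop := out = appearxtimes_alt lst
instance (lst : List Int) (out : Int) : Decidable (Spec_appearxtimes lst out) := by unfold Spec_appearxtimes; infer_instance

-- ===== CLAIM (what is proved, stated in full; the proofs are below) =====
def Claim_equal_appearxtimes : Prop := ∀ (lst : List Int), Dom_appearxtimes lst → Pre_appearxtimes lst → Spec_appearxtimes lst (appearxtimes lst)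

-- ===== LEMMAS AND PROOFS =====

-- a Dict built from a pairs list with distinct keys keeps exactly that items list
theorem dictUpdate_items (acc ps : List (Int × Int))
    (h : ((acc ++ ps).map Prod.fst).Nodup) :
    ((PySem.Dict.mk acc).update ps).items = acc ++ ps := by
  induction ps generalizing acc with
  | nil => simp [PySem.Dict.update]
  | cons p ps ih =>
      have hmap : (acc.map Prod.fst ++ p.1 :: ps.map Prod.fst).Nodup := by simpa using h
      have hni : p.1 ∉ acc.map Prod.fst := by
        intro hmem
        exact List.disjoint_of_nodup_append hmap hmem List.mem_cons_self
      have hc : (PySem.Dict.mk acc).contains p.1 = false := by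
        simp only [PySem.Dict.contains, List.any_eq_false, beq_iff_eq]
        intro q hq hq1
        exact hni (List.mem_map.mpr ⟨q, hq, hq1⟩)
      have hins : (PySem.Dict.mk acc).insert p.1 p.2 = PySem.Dict.mk (acc ++ [p]) := by
        simp [PySem.Dict.insert, hc]
      have : ((PySem.Dict.mk acc).update (p :: ps)).items
          = ((PySem.Dict.mk (acc ++ [p])).update ps).items := by
        simp [PySem.Dict.update] at hins ⊢
        rw [hins]
      rw [this, ih (acc ++ [p]) (by simpa using h)]
      simp

theorem items_ofList_nodup (ps : List (Int × Int)) (h : (ps.map Prod.fst).Nodup) :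
    (PySem.Dict.ofList ps).items = ps := by
  simpa using dictUpdate_items [] ps (by simpa using h)

-- characterisation of B's run-length scan over a sorted suffix
theorem bRunLoop_spec (x : Int) (s : List Int) :
    ∀ (rv : Int) (n : Nat), 1 ≤ n →
    s.Pairwise (· ≤ ·) → (∀ y ∈ s, rv ≤ y) →
    (bRunLoop x s rv (n : Int) = -1 ∧
       ∀ v ∈ (List.replicate n rv ++ s), ((List.replicate n rv ++ s).count v : Int) ≠ x) ∨
    (∃ m, bRunLoop x s rv (n : Int) = m ∧ m ∈ (List.replicate n rv ++ s) ∧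
       ((List.replicate n rv ++ s).count m : Int) = x ∧
       ∀ v ∈ (List.replicate n rv ++ s), ((List.replicate n rv ++ s).count v : Int) = x → m ≤ v) := by
  induction s with
  | nil =>
      intro rv n hn _ _
      by_cases hx : (n : Int) = x
      · right
        refine ⟨rv, by simp [bRunLoop, hx], by simp [List.mem_replicate]; omega, by simpa using hx, ?_⟩
        intro v hv _
        have : v = rv := List.eq_of_mem_replicate (by simpa using hv)
        simp [this]
      · left
        refine ⟨by simp [bRunLoop, hx], ?_⟩
        intro v hv
        have : v = rv := List.eq_of_mem_replicate (by simpa using hv)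
        simpa [this] using hx
  | cons v rest ih =>
      intro rv n hn hs hub
      have hrest_pw : rest.Pairwise (· ≤ ·) := hs.of_cons
      have hv_le : ∀ y ∈ rest, v ≤ y := by
        intro y hy; exact List.rel_of_pairwise_cons hs hy
      by_cases hv : v = rv
      · -- extend the current run
        subst hv
        have hL : List.replicate n v ++ v :: rest = List.replicate (n + 1) v ++ rest := by
          rw [List.replicate_succ']
          simp
        have hrec := ih v (n + 1) (by omega) hrest_pw hv_le
        have hcast : ((n + 1 : Nat) : Int) = ((n : Int) + 1) := by push_cast; ring
        rw [hcast] at hrec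
        have hstep : bRunLoop x (v :: rest) v (n : Int) = bRunLoop x rest v ((n : Int) + 1) := by
          simp [bRunLoop]
        rw [hL, hstep]
        exact hrec
      · -- the run of rv ends here
        have hrv_lt : rv < v := lt_of_le_of_ne (hub v (List.mem_cons_self)) (fun h => hv h.symm)
        have hgt : ∀ u ∈ v :: rest, rv < u := by
          intro u hu
          rcases List.mem_cons.mp hu with h | h
          · exact h ▸ hrv_lt
          · exact lt_of_lt_of_le hrv_lt (hv_le u h)
        have hrv_notmem : rv ∉ v :: rest := fun h => lt_irrefl rv (hgt rv h)
        have hcount_rv : ((List.replicate n rv ++ v :: rest).count rv : Int) = (n : Int) := by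
          rw [List.count_append]
          simp [List.count_eq_zero_of_not_mem hrv_notmem]
        have hcount_other : ∀ u, u ≠ rv →
            (List.replicate n rv ++ v :: rest).count u = (v :: rest).count u := by
          intro u hu
          simp [List.count_append, List.count_replicate, Ne.symm hu]
        by_cases hx : (n : Int) = x
        · right
          refine ⟨rv, by simp [bRunLoop, hv, hx], by simp [List.mem_replicate]; omega,
            by rw [hcount_rv]; exact hx, ?_⟩
          intro u hu _
          rcases List.mem_append.mp hu with h | h
          · simp [List.eq_of_mem_replicate h]
          · exact le_of_lt (hgt u h)
        · -- start a fresh run at v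
          have hrec := ih v 1 le_rfl hrest_pw hv_le
          have hL1 : List.replicate 1 v ++ rest = v :: rest := by simp
          rw [hL1] at hrec
          have hloop : bRunLoop x (v :: rest) rv (n : Int) = bRunLoop x rest v (1 : Int) := by
            simp [bRunLoop, hv, hx]
          rcases hrec with ⟨heq, hall⟩ | ⟨m, heq, hmem, hcm, hmin⟩
          · left
            refine ⟨by rw [hloop]; exact_mod_cast heq, ?_⟩
            intro u hu
            rcases List.mem_append.mp hu with h | h
            · have : u = rv := List.eq_of_mem_replicate h
              rw [this, hcount_rv]; exact hx
            · rw [hcount_other u (fun h' => lt_irrefl rv (h' ▸ hgt u h))]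
              exact hall u h
          · right
            have hm_ne : m ≠ rv := fun h' => lt_irrefl rv (h' ▸ hgt m hmem)
            refine ⟨m, by rw [hloop]; exact_mod_cast heq,
              List.mem_append.mpr (Or.inr hmem),
              by rw [hcount_other m hm_ne]; exact hcm, ?_⟩
            intro u hu hcu
            rcases List.mem_append.mp hu with h | h
            · exact absurd (by rw [List.eq_of_mem_replicate h, hcount_rv] at hcu; exact hcu) hx
            · exact hmin u h (by rw [hcount_other u (fun h' => lt_irrefl rv (h' ▸ hgt u h))] at hcu; exact hcu)

-- the keys of A's filtered dict are exactly the tail's values occurring x times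
theorem keysA (t : List Int) (x : Int) :
    (PySem.Dict.ofList (((PySem.Dict.counter t).items).filter (fun p => p.2 == x))).items
      = ((PySem.Set.ofList t).filter (fun k => ((t.count k : Int) == x))).map
          (fun k => (k, (t.count k : Int))) := by
  rw [PySem.Dict.items_counter, List.filter_map]
  apply items_ofList_nodup
  rw [List.map_map]
  simp only [Function.comp_def]
  simpa using (PySem.Set.nodup_ofList t).filter _

theorem appearxtimes_spec' (lst : List Int) (hpre : lst ≠ []) :
    appearxtimes lst = appearxtimes_alt lst := by
  obtain ⟨h, t, rfl⟩ : ∃ h t, lst = h :: t := by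
    cases lst with
    | nil => exact absurd rfl hpre
    | cons a b => exact ⟨a, b, rfl⟩
  have hslice : PySem.List.slice (h :: t) (some 1) = t := by
    rw [PySem.List.slice_from _ (by norm_num)]
    simp
  have hx : PySem.List.pyGetD (h :: t) 0 0 = h := by
    simp [pysem]
  -- K: the filtered key list of A
  set K := ((PySem.Set.ofList t).filter (fun k => ((t.count k : Int) == h))) with hK
  have hKmem : ∀ u, u ∈ K ↔ u ∈ t ∧ (t.count u : Int) = h := by
    intro u
    simp [hK, List.mem_filter, PySem.Set.mem_ofList]
  have hitems : (PySem.Dict.ofList (((PySem.Dict.counter t).items).filter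
      (fun p => p.2 == h))).items = K.map (fun k => (k, (t.count k : Int))) := keysA t h
  have hkeys : (PySem.Dict.ofList (((PySem.Dict.counter t).items).filter
      (fun p => p.2 == h))).keys = K := by
    simp only [PySem.Dict.keys, hitems, List.map_map]
    simp [Function.comp_def]
  -- the sorted tail
  set s := PySem.List.sorted t (fun y => y) with hs
  have hperm : s.Perm t := PySem.List.sorted_perm t _ _
  unfold appearxtimes appearxtimes_alt
  simp only [hslice, hx, ← hs, hitems, hkeys]
  cases hcs : s with
  | nil =>
      have hp2 := hperm
      rw [hcs] at hp2
      have ht : t = [] := hp2.symm.eq_nil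
      subst ht
      simp [hK, PySem.Set.ofList]
  | cons m rest =>
      have hpw : (m :: rest).Pairwise (· ≤ ·) := by
        have := PySem.List.sorted_pairwise t (fun y : Int => y)
        rw [← hs, hcs] at this
        exact this
      have hspec := bRunLoop_spec h rest m 1 le_rfl hpw.of_cons
        (fun y hy => List.rel_of_pairwise_cons hpw hy)
      have hL : List.replicate 1 m ++ rest = m :: rest := by simp
      rw [hL] at hspec
      have hcnt : ∀ u, ((m :: rest).count u : Int) = (t.count u : Int) := by
        intro u
        rw [← hcs, hperm.count_eq]
      have hmm : ∀ u, u ∈ m :: rest ↔ u ∈ t := by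
        intro u; rw [← hcs, hperm.mem_iff]
      rcases hspec with ⟨heq, hall⟩ | ⟨mm, heq, hmem, hcm, hmin⟩
      · -- no value of the tail occurs h times: K is empty, both return -1
        have hKnil : K = [] := by
          by_contra hne
          obtain ⟨u, hu⟩ := List.exists_mem_of_ne_nil _ hne
          obtain ⟨hut, hcu⟩ := (hKmem u).mp hu
          exact hall u ((hmm u).mpr hut) (by rw [hcnt u]; exact hcu)
        have heq' : bRunLoop h rest m 1 = -1 := by simpa using heq
        simp only [hKnil, List.map_nil]
        show (-1 : Int) = bRunLoop h rest m 1
        exact heq'.symm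
      · -- mm is the smallest value occurring h times; A's min over K is mm too
        have hmmK : mm ∈ K := (hKmem mm).mpr ⟨(hmm mm).mp hmem, by rw [← hcnt mm]; exact hcm⟩
        have hKne' : K ≠ [] := by
          intro hnil; rw [hnil] at hmmK; simp at hmmK
        have hKne : ¬ (K.map (fun k => (k, (t.count k : Int))) = []) := by
          simp [hKne']
        rw [if_neg hKne]
        obtain ⟨μ, hμ⟩ : ∃ μ, PySem.List.min? K (fun k => k) = some μ := by
          cases hmin? : PySem.List.min? K (fun k => k) with
          | none => exact absurd ((PySem.List.min?_eq_none_iff _ _).mp hmin?) hKne'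
          | some μ => exact ⟨μ, rfl⟩
        have hμK := PySem.List.min?_mem hμ
        obtain ⟨hμt, hcμ⟩ := (hKmem μ).mp hμK
        have h1 : mm ≤ μ := hmin μ ((hmm μ).mpr hμt) (by rw [hcnt μ]; exact hcμ)
        have h2 : μ ≤ mm := PySem.List.min?_isMin hμ mm hmmK
        have heq' : bRunLoop h rest m 1 = mm := by simpa using heq
        rw [hμ]
        show μ = bRunLoop h rest m 1
        rw [heq']
        exact le_antisymm h2 h1

-- ===== VERDICT (by name: the statement is the Claim_ definition above) =====
theorem appearxtimes_spec : Claim_equal_appearxtimes := by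
  intro lst _ hpre
  exact appearxtimes_spec' lst hpre
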